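-- pv_equiv track=rewrite | github.com/nsimeyroneinc/NSITerm2024 | python/DS0011/Ex1.py | retourner_clement
-- ===== SOURCE A (Python) =====
-- def creer_pile_vide():
--     return []
--
-- def est_vide(P):
--     if P==[]:
--         return True
--     else:
--         return False
--
-- def empiler(P,x):
--     P.append(x)
--
-- def depiler(P):
--     if est_vide(P) == True :
--         raise IndexError("Vous avez essayé de dépiler une pile vide !")
--     else :
--         return P.pop()
--
-- def retourner_clement(P,i):
--     Q=creer_pile_vide()
--     R=creer_pile_vide()
--     rang=1
--     while rang<=i:
--         x=depiler(P)
--         empiler(Q,x)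
--         rang+=1
--
--     while not est_vide(Q):
--         x=depiler(Q)
--         empiler(R,x)
--
--     while not est_vide(R):
--         x=depiler(R)
--         empiler(P,x)
--     return P
-- ===== SOURCE B (Python) =====
-- # Slice-based rewrite: reverse the top i elements in place with one slice assignment
-- # (mutates P in place, like A, and returns the same object).
-- def retourner_clement(P, i):
--     if i > len(P):
--         raise IndexError("Vous avez essayé de dépiler une pile vide !")
--     if i > 0:
--         P[-i:] = P[-i:][::-1]
--     return P
-- ===== Notes on version B (the rewrite author's own statement) =====
-- stated objective: simpler
-- what changed: Replaces A's three pop/push draining loops through two auxiliary stacks by a single in-place slice assignment P[-i:] = P[-i:][::-1] (with an explicit bound check reproducing the empty-pop IndexError).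
import Mathlib
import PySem

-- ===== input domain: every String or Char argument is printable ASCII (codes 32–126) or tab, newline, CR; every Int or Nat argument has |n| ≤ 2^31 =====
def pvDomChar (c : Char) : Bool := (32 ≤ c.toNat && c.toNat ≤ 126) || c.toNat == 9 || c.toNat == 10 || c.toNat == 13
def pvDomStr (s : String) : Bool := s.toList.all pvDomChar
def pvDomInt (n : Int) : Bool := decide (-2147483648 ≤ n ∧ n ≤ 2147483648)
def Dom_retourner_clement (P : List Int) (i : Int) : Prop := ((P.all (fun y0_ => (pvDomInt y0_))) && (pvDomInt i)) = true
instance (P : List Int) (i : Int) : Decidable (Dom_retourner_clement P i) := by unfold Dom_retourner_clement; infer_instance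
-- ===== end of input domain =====

-- B replaces A's three pop/push draining loops through two auxiliary stacks by one slice
-- assignment reversing the top i elements; A mutates P in place, the equivalence here is
-- about the RETURN value (Source B performs the same in-place mutation).

-- ===== PORT A =====
-- first while loop: rang=1..i, pop from P, push on Q (fuel = number of iterations)
def pvPopLoopA (n : Nat) (P Q : List Int) : List Int × List Int :=
  match n with
  | 0 => (P, Q)
  | m + 1 =>
    match PySem.List.pop? P with
    | none => (P, Q)          -- depiler raises IndexError here; excluded by Pre_
    | some r => pvPopLoopA m r.2 (Q ++ [r.1])

-- second/third while loops: drain src (pop) onto dst (push) until src is empty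
def pvDrainA (src dst : List Int) : List Int :=
  match h : PySem.List.pop? src with
  | none => dst
  | some r => pvDrainA r.2 (dst ++ [r.1])
termination_by src.length
decreasing_by have := PySem.List.length_of_pop?_eq_some src h; omega

def retourner_clement (P : List Int) (i : Int) : List Int :=
  let s := pvPopLoopA i.toNat P []     -- while rang<=i: Q.push(P.pop())
  let R := pvDrainA s.2 []             -- while Q nonempty: R.push(Q.pop())
  pvDrainA R s.1                       -- while R nonempty: P.push(R.pop())

-- ===== PORT B =====
def retourner_clement_alt (P : List Int) (i : Int) : List Int :=
  if (P.length : Int) < i then P      -- Source B raises IndexError here; excluded by Pre_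
  else if 0 < i then
    -- P[-i:] = P[-i:][::-1]  (slice assignment: prefix P[:-i] kept, tail reversed)
    PySem.List.slice P none (some (-i)) ++ (PySem.List.slice P (some (-i)) none).reverse
  else P

-- ===== PRECONDITION & SPEC =====
-- Pre_ excludes exactly the inputs where A raises IndexError (popping an emptied stack): i > len(P).
def Pre_retourner_clement (P : List Int) (i : Int) : Prop := i ≤ (P.length : Int)
instance (P : List Int) (i : Int) : Decidable (Pre_retourner_clement P i) := by unfold Pre_retourner_clement; infer_instance
def pvWitness_retourner_clement : List Int × Int := ([1, 2, 3, 4], 3)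

def Spec_retourner_clement (P : List Int) (i : Int) (out : List Int) : Prop := out = retourner_clement_alt P i
instance (P : List Int) (i : Int) (out : List Int) : Decidable (Spec_retourner_clement P i out) := by unfold Spec_retourner_clement; infer_instance

-- ===== CLAIM (what is proved, stated in full; the proofs are below) =====
def Claim_equal_retourner_clement : Prop := ∀ (P : List Int) (i : Int), Dom_retourner_clement P i → Pre_retourner_clement P i → Spec_retourner_clement P i (retourner_clement P i)

-- ===== LEMMAS AND PROOFS =====

-- the pop loop peels n elements off the back of P onto Q
theorem pvPopLoopA_spec (n : Nat) : ∀ (P Q : List Int), n ≤ P.length →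
    pvPopLoopA n P Q = (P.take (P.length - n), Q ++ (P.drop (P.length - n)).reverse) := by
  induction n with
  | zero => intro P Q _; simp [pvPopLoopA]
  | succ m ih =>
    intro P Q hn
    cases P using List.reverseRecOn with
    | nil => simp at hn
    | append_singleton P' x =>
    rw [pvPopLoopA, PySem.List.pop?_last]
    have hm : m ≤ P'.length := by simp at hn; omega
    show pvPopLoopA m P' (Q ++ [x]) = _
    rw [ih P' (Q ++ [x]) hm]
    have h2 : (P' ++ [x]).take (P'.length - m) = P'.take (P'.length - m) := by
      rw [List.take_append_of_le_length (by omega)]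
    have h3 : (P' ++ [x]).drop (P'.length - m) = P'.drop (P'.length - m) ++ [x] := by
      rw [List.drop_append_of_le_length (by omega)]
    simp [h2, h3]

-- draining one stack onto another appends the source reversed
theorem pvDrainA_spec (src dst : List Int) : pvDrainA src dst = dst ++ src.reverse := by
  fun_induction pvDrainA src dst with
  | case1 src dst h =>
    have : src = [] := by
      cases src using List.reverseRecOn with
      | nil => rfl
      | append_singleton xs x => rw [PySem.List.pop?_last] at h; cases h
    simp [this]
  | case2 src dst r h ih =>
    cases src using List.reverseRecOn with
    | nil => simp [PySem.List.pop?] at h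
    | append_singleton xs x =>
      rw [PySem.List.pop?_last] at h
      cases h
      simp [ih]

-- ===== VERDICT (by name: the statement is the Claim_ definition above) =====
theorem retourner_clement_spec : Claim_equal_retourner_clement := by
  intro P i _ hpre
  unfold Spec_retourner_clement retourner_clement retourner_clement_alt Pre_retourner_clement at *
  by_cases hi : 0 < i
  · have hk : i = (i.toNat : Int) := by omega
    have hkpos : 0 < i.toNat := by omega
    have hlen : i.toNat ≤ P.length := by omega
    rw [pvPopLoopA_spec i.toNat P [] hlen]
    simp only
    rw [pvDrainA_spec, pvDrainA_spec]
    rw [if_neg (by omega), if_pos hi, hk,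
        PySem.List.slice_to_neg_natCast P i.toNat hkpos,
        PySem.List.slice_from_neg_natCast P i.toNat hkpos]
    have hmx : max i 0 = i := by omega
    simp [hmx]
  · have : i.toNat = 0 := by omega
    rw [this, pvPopLoopA_spec 0 P [] (by omega)]
    simp only
    rw [pvDrainA_spec, pvDrainA_spec]
    rw [if_neg (by omega), if_neg hi]
    simp
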